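-- pv_equiv track=rewrite | github.com/CPy255/GeoTrack-GS | tools/extract_and_triangulate_tracks.py | build_tracks
-- ===== SOURCE A (Python) =====
-- from collections import defaultdict
--
-- def build_tracks(pairwise_matches, num_images):
--     """从成对的匹配中构建全局特征轨迹"""
--     # 使用并查集(Disjoint Set Union)数据结构来高效地合并轨迹
--     parent = {}
--
--     def find(i):
--         if i not in parent:
--             parent[i] = i
--         if parent[i] == i:
--             return i
--         parent[i] = find(parent[i])
--         return parent[i]
--
--     def union(i, j):
--         root_i = find(i)
--         root_j = find(j)
--         if root_i != root_j:
--             parent[root_j] = root_i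
--
--     # (image_idx, point_idx) 作为每个特征点的唯一标识
--     for (img1_idx, img2_idx), matches in pairwise_matches.items():
--         for p1_idx, p2_idx in matches:
--             union((img1_idx, p1_idx), (img2_idx, p2_idx))
--
--     # 将合并后的集合整理成轨迹
--     tracks = defaultdict(list)
--     for node in parent:
--         track_id = find(node)
--         tracks[track_id].append(node)
--
--     return list(tracks.values())
-- ===== SOURCE B (Python) =====
-- def build_tracks(pairwise_matches, num_images):
--     """Flat-label connected components: every node maps directly to its
--     component label (no parent tree, no recursion); merging relabels in one pass."""
--     label = {}
--     for (img1_idx, img2_idx), matches in pairwise_matches.items():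
--         for p1_idx, p2_idx in matches:
--             u = (img1_idx, p1_idx)
--             v = (img2_idx, p2_idx)
--             if u not in label:
--                 label[u] = u
--             if v not in label:
--                 label[v] = v
--             ru, rv = label[u], label[v]
--             if ru != rv:
--                 label = {k: (ru if x == rv else x) for k, x in label.items()}
--     tracks = {}
--     for node, r in label.items():
--         tracks.setdefault(r, []).append(node)
--     return list(tracks.values())
-- ===== Notes on version B (the rewrite author's own statement) =====
-- stated objective: simpler
-- what changed: Replaces A's recursive union-find (parent forest with path compression, rebuilt roots via find) by a flat node-to-label dictionary: a merge rewrites every occurrence of one label in a single dict comprehension, and the grouping pass just reads the stored labels instead of re-running find.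
import Mathlib
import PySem

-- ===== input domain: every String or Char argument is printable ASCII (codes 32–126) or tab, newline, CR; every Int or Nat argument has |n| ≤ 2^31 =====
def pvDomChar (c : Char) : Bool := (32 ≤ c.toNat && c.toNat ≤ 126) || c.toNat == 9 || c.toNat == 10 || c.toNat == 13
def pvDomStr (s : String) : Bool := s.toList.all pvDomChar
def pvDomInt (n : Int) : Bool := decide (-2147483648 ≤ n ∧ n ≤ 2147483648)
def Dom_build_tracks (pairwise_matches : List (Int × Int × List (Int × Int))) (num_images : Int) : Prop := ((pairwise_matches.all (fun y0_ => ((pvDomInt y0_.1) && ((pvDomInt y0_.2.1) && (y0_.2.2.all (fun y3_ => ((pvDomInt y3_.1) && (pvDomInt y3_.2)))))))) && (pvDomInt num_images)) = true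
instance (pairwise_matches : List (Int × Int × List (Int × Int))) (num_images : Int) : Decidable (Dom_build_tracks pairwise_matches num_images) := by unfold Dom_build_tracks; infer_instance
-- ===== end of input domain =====

-- B replaces A's recursive path-compressing union-find by a flat node→label map
-- merged by a one-pass relabel (objective: simpler — no recursion, no parent tree).

-- ===== PORT A =====
-- Python find(i): recursive with path compression, mutating parent; ported with a
-- fuel parameter (fuel only makes the recursion structural; it is chosen large
-- enough — number of match pairs + 1 — and the proofs below show it never runs out).
def pvFindA (fuel : Nat) (p : PySem.Dict (Int × Int) (Int × Int)) (i : Int × Int) :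
    (Int × Int) × PySem.Dict (Int × Int) (Int × Int) :=
  match fuel with
  | 0 => (i, p)
  | fuel + 1 =>
    match p.get? i with
    | none => (i, p.insert i i)
    | some j =>
      if j = i then (i, p)
      else
        let rp := pvFindA fuel p j
        (rp.1, rp.2.insert i rp.1)

def pvUnionA (fuel : Nat) (p : PySem.Dict (Int × Int) (Int × Int)) (i j : Int × Int) :
    PySem.Dict (Int × Int) (Int × Int) :=
  let rp₁ := pvFindA fuel p i
  let rp₂ := pvFindA fuel rp₁.2 j
  if rp₁.1 ≠ rp₂.1 then rp₂.2.insert rp₂.1 rp₁.1 else rp₂.2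

def build_tracks (pairwise_matches : List (Int × Int × List (Int × Int))) (num_images : Int) : List (List (Int × Int)) :=
  let fuel := (pairwise_matches.foldl (fun a x => a + x.2.2.length) 0) + 1
  let parent := pairwise_matches.foldl
    (fun p x => x.2.2.foldl (fun p m => pvUnionA fuel p (x.1, m.1) (x.2.1, m.2)) p)
    PySem.Dict.empty
  let res := parent.keys.foldl
    (fun tq node =>
      let rq := pvFindA fuel tq.2 node
      (tq.1.modify rq.1 [] (· ++ [node]), rq.2))
    ((PySem.Dict.empty : PySem.Dict (Int × Int) (List (Int × Int))), parent)
  res.1.values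

-- ===== PORT B =====
-- dict comprehension {k: (ru if x == rv else x) for k, x in label.items()}
def pvRelabel (l : PySem.Dict (Int × Int) (Int × Int)) (ru rv : Int × Int) :
    PySem.Dict (Int × Int) (Int × Int) :=
  PySem.Dict.mk (l.items.map (fun kx => (kx.1, if kx.2 = rv then ru else kx.2)))

def pvStepB (l : PySem.Dict (Int × Int) (Int × Int)) (u v : Int × Int) :
    PySem.Dict (Int × Int) (Int × Int) :=
  let l₁ := if l.contains u then l else l.insert u u
  let l₂ := if l₁.contains v then l₁ else l₁.insert v v
  let ru := l₂.getD u u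
  let rv := l₂.getD v v
  if ru ≠ rv then pvRelabel l₂ ru rv else l₂

def build_tracks_alt (pairwise_matches : List (Int × Int × List (Int × Int))) (num_images : Int) : List (List (Int × Int)) :=
  let label := pairwise_matches.foldl
    (fun l x => x.2.2.foldl (fun l m => pvStepB l (x.1, m.1) (x.2.1, m.2)) l)
    PySem.Dict.empty
  let tracks := label.items.foldl
    (fun t kr => t.modify kr.2 [] (· ++ [kr.1]))
    ((PySem.Dict.empty : PySem.Dict (Int × Int) (List (Int × Int))))
  tracks.values

-- ===== PRECONDITION & SPEC =====
def Spec_build_tracks (pairwise_matches : List (Int × Int × List (Int × Int))) (num_images : Int) (out : List (List (Int × Int))) : Prop := out = build_tracks_alt pairwise_matches num_images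
instance (pairwise_matches : List (Int × Int × List (Int × Int))) (num_images : Int) (out : List (List (Int × Int))) : Decidable (Spec_build_tracks pairwise_matches num_images out) := by unfold Spec_build_tracks; infer_instance

-- ===== CLAIM (what is proved, stated in full; the proofs are below) =====
def Claim_equal_build_tracks : Prop := ∀ (pairwise_matches : List (Int × Int × List (Int × Int))) (num_images : Int), Dom_build_tracks pairwise_matches num_images → Spec_build_tracks pairwise_matches num_images (build_tracks pairwise_matches num_images)

-- ===== LEMMAS AND PROOFS =====

-- pure (non-mutating) root chase in A's parent map, with explicit fuel
def pvRootN : Nat → PySem.Dict (Int × Int) (Int × Int) → (Int × Int) → Option (Int × Int)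
  | 0, _, _ => none
  | n + 1, p, i =>
    match p.get? i with
    | none => none
    | some j => if j = i then some i else pvRootN n p j

-- invariant tying A's parent forest to B's flat label map: same keys in the same
-- insertion order, and every node's union-find root equals its flat label
def pvINV (n : Nat) (p l : PySem.Dict (Int × Int) (Int × Int)) : Prop :=
  p.keys = l.keys ∧ l.keys.Nodup ∧ ∀ k ∈ l.keys, pvRootN n p k = l.get? k

lemma pvRootN_succ {n : Nat} {p : PySem.Dict (Int × Int) (Int × Int)} {i r : Int × Int}
    (h : pvRootN n p i = some r) : pvRootN (n + 1) p i = some r := by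
  induction n generalizing i with
  | zero => simp [pvRootN] at h
  | succ n ih =>
    rw [pvRootN] at h ⊢
    cases hg : p.get? i with
    | none => simp [hg] at h
    | some j =>
      simp only [hg] at h ⊢
      by_cases hji : j = i
      · simpa [hji] using h
      · simp only [if_neg hji] at h ⊢
        exact ih h

lemma pvRootN_mono {n m : Nat} {p : PySem.Dict (Int × Int) (Int × Int)} {i r : Int × Int}
    (hnm : n ≤ m) (h : pvRootN n p i = some r) : pvRootN m p i = some r := by
  induction hnm with
  | refl => exact h
  | step _ ih => exact pvRootN_succ ih

lemma pvRootN_root {n : Nat} {p : PySem.Dict (Int × Int) (Int × Int)} {i r : Int × Int}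
    (h : pvRootN n p i = some r) : p.get? r = some r := by
  induction n generalizing i with
  | zero => simp [pvRootN] at h
  | succ n ih =>
    rw [pvRootN] at h
    cases hg : p.get? i with
    | none => simp [hg] at h
    | some j =>
      simp only [hg] at h
      by_cases hji : j = i
      · simp only [if_pos hji, Option.some.injEq] at h
        subst h; rwa [hji] at hg
      · simp only [if_neg hji] at h
        exact ih h

lemma pvRootN_det {n m : Nat} {p : PySem.Dict (Int × Int) (Int × Int)} {i r r' : Int × Int}
    (h : pvRootN n p i = some r) (h' : pvRootN m p i = some r') : r = r' := by
  have h1 := pvRootN_mono (Nat.le_max_left n m) h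
  have h2 := pvRootN_mono (Nat.le_max_right n m) h'
  rw [h1] at h2; exact Option.some.inj h2

-- inserting a fresh self-loop does not disturb existing chains
lemma pvRootN_insert_fresh {p : PySem.Dict (Int × Int) (Int × Int)} {u : Int × Int}
    (hu : p.get? u = none) {n : Nat} {k r : Int × Int}
    (h : pvRootN n p k = some r) : pvRootN n (p.insert u u) k = some r := by
  induction n generalizing k with
  | zero => simp [pvRootN] at h
  | succ n ih =>
    rw [pvRootN] at h ⊢
    cases hg : p.get? k with
    | none => simp [hg] at h
    | some j =>
      have hku : k ≠ u := fun e => by rw [e, hu] at hg; cases hg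
      rw [PySem.Dict.get?_insert, if_neg hku, hg]
      simp only [hg] at h
      by_cases hji : j = k
      · simpa [hji] using h
      · simp only [if_neg hji] at h ⊢
        exact ih h

-- path compression (pointing a node straight at its root) preserves all roots
lemma pvRootN_compress {p : PySem.Dict (Int × Int) (Int × Int)} {c j r : Int × Int} {m : Nat}
    (hc : p.get? c = some j) (hr : pvRootN m p c = some r) :
    ∀ n k r', pvRootN n p k = some r' → pvRootN n (p.insert c r) k = some r' := by
  have hroot : p.get? r = some r := pvRootN_root hr
  intro n
  induction n with
  | zero => intro k r' h; simp [pvRootN] at h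
  | succ n ih =>
    intro k r' h
    by_cases hkc : k = c
    · subst hkc
      have hr' : r = r' := pvRootN_det hr h
      subst hr'
      by_cases hrc : r = k
      · simp [pvRootN, hrc]
      · -- need 1 ≤ n: h unfolds through at least two levels since r ≠ k
        have hn : 1 ≤ n := by
          rw [pvRootN, hc] at h
          by_cases hjc : j = k
          · simp only [if_pos hjc, Option.some.injEq] at h
            exact absurd h.symm hrc
          · simp only [if_neg hjc] at h
            rcases n with _ | n
            · simp [pvRootN] at h
            · omega
        rcases n with _ | n
        · omega
        · simp [pvRootN, PySem.Dict.get?_insert, hrc, hroot]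
    · rw [pvRootN] at h ⊢
      rw [PySem.Dict.get?_insert, if_neg hkc]
      cases hg : p.get? k with
      | none => simp [hg] at h
      | some j' =>
        simp only [hg] at h ⊢
        by_cases hj' : j' = k
        · simpa [hj'] using h
        · simp only [if_neg hj'] at h ⊢
          exact ih _ _ h

-- union (pointing root b at root a) redirects exactly the b-rooted chains
lemma pvRootN_union {p : PySem.Dict (Int × Int) (Int × Int)} {a b : Int × Int}
    (hb : p.get? b = some b) (ha : p.get? a = some a) (hab : a ≠ b) :
    ∀ n k r', pvRootN n p k = some r' →
      pvRootN (n + 1) (p.insert b a) k = some (if r' = b then a else r') := by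
  intro n
  induction n with
  | zero => intro k r' h; simp [pvRootN] at h
  | succ n ih =>
    intro k r' h
    rw [pvRootN] at h
    by_cases hkb : k = b
    · subst hkb
      rw [hb] at h
      simp at h
      subst h
      simp [pvRootN, PySem.Dict.get?_insert, hab, ha]
    · rw [pvRootN, PySem.Dict.get?_insert, if_neg hkb]
      cases hg : p.get? k with
      | none => simp [hg] at h
      | some j' =>
        simp only [hg] at h ⊢
        by_cases hj' : j' = k
        · simp only [if_pos hj', Option.some.injEq] at h
          subst h
          simp only [if_neg hkb, if_pos hj']
        · simp only [if_neg hj'] at h ⊢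
          exact ih _ _ h

-- find on a node whose chain terminates: returns the root, keeps the key list,
-- and preserves every existing root
lemma pvFindA_spec : ∀ (fuel : Nat) (p : PySem.Dict (Int × Int) (Int × Int)) (i r : Int × Int),
    pvRootN fuel p i = some r →
    (pvFindA fuel p i).1 = r ∧
    (pvFindA fuel p i).2.keys = p.keys ∧
    (∀ n k r', pvRootN n p k = some r' → pvRootN n (pvFindA fuel p i).2 k = some r') := by
  intro fuel
  induction fuel with
  | zero => intro p i r h; simp [pvRootN] at h
  | succ fuel ih =>
    intro p i r h
    rw [pvRootN] at h
    cases hg : p.get? i with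
    | none => simp [hg] at h
    | some j =>
      simp only [hg] at h
      by_cases hji : j = i
      · simp only [if_pos hji, Option.some.injEq] at h
        subst h
        simp [pvFindA, hg, hji]
      · simp only [if_neg hji] at h
        obtain ⟨h1, h2, h3⟩ := ih p j r h
        have hfa : pvFindA (fuel + 1) p i
            = ((pvFindA fuel p j).1, (pvFindA fuel p j).2.insert i (pvFindA fuel p j).1) := by
          simp [pvFindA, hg, hji]
        rw [hfa, h1]
        have hifull : pvRootN (fuel + 1) p i = some r := by
          rw [pvRootN, hg]; simpa [hji] using h
        have hi1 : pvRootN (fuel + 1) (pvFindA fuel p j).2 i = some r := h3 _ _ _ hifull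
        have himem : i ∈ p.keys := by
          by_contra hmem
          rw [← PySem.Dict.get?_eq_none_iff_not_mem_keys] at hmem
          rw [hmem] at hg; cases hg
        have hikey : (pvFindA fuel p j).2.get? i ≠ none := by
          intro hnone
          rw [PySem.Dict.get?_eq_none_iff_not_mem_keys, h2] at hnone
          exact hnone himem
        obtain ⟨j₂, hj₂⟩ := Option.ne_none_iff_exists'.mp hikey
        refine ⟨rfl, ?_, ?_⟩
        · rw [PySem.Dict.keys_insert_of_contains, h2]
          rw [PySem.Dict.contains_iff_mem_keys, h2]
          exact himem
        · intro n k r' hk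
          exact pvRootN_compress hj₂ hi1 n k r' (h3 n k r' hk)

lemma pvFindA_fresh {fuel : Nat} {p : PySem.Dict (Int × Int) (Int × Int)} {i : Int × Int}
    (h : p.get? i = none) (hf : 1 ≤ fuel) :
    pvFindA fuel p i = (i, p.insert i i) := by
  rcases fuel with _ | fuel
  · omega
  · simp [pvFindA, h]

lemma pvGet?_of_mem_keys {l : PySem.Dict (Int × Int) (Int × Int)} {k : Int × Int}
    (h : k ∈ l.keys) : ∃ v, l.get? k = some v := by
  cases hg : l.get? k with
  | none => exact absurd ((PySem.Dict.get?_eq_none_iff_not_mem_keys _ _).mp hg) (not_not_intro h)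
  | some v => exact ⟨v, rfl⟩

lemma pvINV_mono {n m : Nat} {p l : PySem.Dict (Int × Int) (Int × Int)}
    (hnm : n ≤ m) (h : pvINV n p l) : pvINV m p l := by
  obtain ⟨hk, hnd, hr⟩ := h
  refine ⟨hk, hnd, fun k hkm => ?_⟩
  obtain ⟨v, hv⟩ := pvGet?_of_mem_keys hkm
  rw [hv]
  exact pvRootN_mono hnm (hv ▸ hr k hkm)

-- one find on A's side ↔ the ensure-present insert on B's side
lemma pvEnsure {n fuel : Nat} {p l : PySem.Dict (Int × Int) (Int × Int)} {u : Int × Int}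
    (hinv : pvINV n p l) (h1 : 1 ≤ n) (hnf : n ≤ fuel) :
    pvINV n (pvFindA fuel p u).2 (if l.contains u then l else l.insert u u) ∧
    (if l.contains u then l else l.insert u u).get? u = some (pvFindA fuel p u).1 := by
  obtain ⟨hk, hnd, hr⟩ := hinv
  by_cases hc : l.contains u = true
  · rw [if_pos hc]
    have hmem : u ∈ l.keys := (PySem.Dict.contains_iff_mem_keys _ _).mp hc
    obtain ⟨ru, hru⟩ := pvGet?_of_mem_keys hmem
    have hroot : pvRootN fuel p u = some ru :=
      pvRootN_mono hnf (by rw [hr u hmem, hru])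
    obtain ⟨f1, f2, f3⟩ := pvFindA_spec fuel p u ru hroot
    refine ⟨⟨f2.trans hk, hnd, fun k hkm => ?_⟩, by rw [hru, f1]⟩
    obtain ⟨v, hv⟩ := pvGet?_of_mem_keys hkm
    rw [hv]
    exact f3 n k v (by rw [← hv]; exact hr k hkm)
  · rw [if_neg hc]
    have hmem : u ∉ l.keys := fun hm => hc ((PySem.Dict.contains_iff_mem_keys _ _).mpr hm)
    have hpnone : p.get? u = none := by
      rw [PySem.Dict.get?_eq_none_iff_not_mem_keys, hk]; exact hmem
    have hpc : p.contains u = false := by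
      rw [PySem.Dict.contains_eq_isSome_get?, hpnone]; rfl
    have hlc : l.contains u = false := by simpa using hc
    rw [pvFindA_fresh hpnone (le_trans h1 hnf)]
    refine ⟨⟨?_, ?_, fun k hkm => ?_⟩, by rw [PySem.Dict.get?_insert_self]⟩
    · rw [PySem.Dict.keys_insert_of_not_contains _ _ hpc,
        PySem.Dict.keys_insert_of_not_contains _ _ hlc, hk]
    · rw [PySem.Dict.keys_insert_of_not_contains _ _ hlc]
      exact List.Nodup.append hnd (List.nodup_singleton u)
        (List.disjoint_singleton.mpr hmem)
    · rw [PySem.Dict.keys_insert_of_not_contains _ _ hlc] at hkm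
      rcases List.mem_append.mp hkm with hkl | hku
      · obtain ⟨v, hv⟩ := pvGet?_of_mem_keys hkl
        have hku : k ≠ u := fun e => hmem (e ▸ hkl)
        rw [PySem.Dict.get?_insert, if_neg hku, hv]
        exact pvRootN_insert_fresh hpnone (by rw [← hv]; exact hr k hkl)
      · have hku : k = u := by simpa using hku
        subst hku
        rw [PySem.Dict.get?_insert_self]
        rcases n with _ | n
        · omega
        · rw [pvRootN, PySem.Dict.get?_insert_self]
          simp

lemma pvGet?_mk_map (ru rv : Int × Int) :
    ∀ (xs : List ((Int × Int) × (Int × Int))) (k : Int × Int),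
      (PySem.Dict.mk (xs.map (fun kx => (kx.1, if kx.2 = rv then ru else kx.2)))).get? k
        = ((PySem.Dict.mk xs).get? k).map (fun x => if x = rv then ru else x) := by
  intro xs
  induction xs with
  | nil => intro k; rfl
  | cons kx rest ih =>
    intro k
    rw [List.map_cons]
    rw [PySem.Dict.get?_mk_cons, PySem.Dict.get?_mk_cons]
    by_cases hk : (kx.1 == k) = true
    · simp [hk]
    · simp only [hk, if_false, Bool.false_eq_true]
      exact ih k

lemma pvRelabel_get? (l : PySem.Dict (Int × Int) (Int × Int)) (ru rv k : Int × Int) :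
    (pvRelabel l ru rv).get? k = (l.get? k).map (fun x => if x = rv then ru else x) := by
  have := pvGet?_mk_map ru rv l.items k
  exact this

lemma pvRelabel_keys (l : PySem.Dict (Int × Int) (Int × Int)) (ru rv : Int × Int) :
    (pvRelabel l ru rv).keys = l.keys := by
  show (l.items.map _).map Prod.fst = l.items.map Prod.fst
  rw [List.map_map]
  rfl

-- one edge step preserves the invariant (A's union ↔ B's insert+relabel)
lemma pvStep_inv {n fuel : Nat} {p l : PySem.Dict (Int × Int) (Int × Int)} {u v : Int × Int}
    (hinv : pvINV n p l) (h1 : 1 ≤ n) (hnf : n ≤ fuel) :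
    pvINV (n + 1) (pvUnionA fuel p u v) (pvStepB l u v) := by
  obtain ⟨hiu, hgu⟩ := pvEnsure (u := u) hinv h1 hnf
  set p₁ := (pvFindA fuel p u).2 with hp₁
  set ru := (pvFindA fuel p u).1 with hru
  set l₁ := if l.contains u then l else l.insert u u with hl₁
  obtain ⟨hiv, hgv⟩ := pvEnsure (u := v) hiu h1 hnf
  set p₂ := (pvFindA fuel p₁ v).2 with hp₂
  set rv := (pvFindA fuel p₁ v).1 with hrv
  set l₂ := if l₁.contains v then l₁ else l₁.insert v v with hl₂
  -- u is still mapped to ru in l₂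
  have hgu₂ : l₂.get? u = some ru := by
    rw [hl₂]
    by_cases hcv : l₁.contains v = true
    · rw [if_pos hcv]; exact hgu
    · rw [if_neg hcv]
      have huv : u ≠ v := by
        intro e
        rw [PySem.Dict.contains_eq_isSome_get?, ← e, hgu] at hcv
        exact hcv rfl
      rw [PySem.Dict.get?_insert, if_neg huv]
      exact hgu
  have hruD : l₂.getD u u = ru := by
    rw [PySem.Dict.getD_eq_get?_getD, hgu₂]; rfl
  have hrvD : l₂.getD v v = rv := by
    rw [PySem.Dict.getD_eq_get?_getD, hgv]; rfl
  obtain ⟨hk₂, hnd₂, hr₂⟩ := hiv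
  have hstepB : pvStepB l u v = if ru ≠ rv then pvRelabel l₂ ru rv else l₂ := by
    rw [pvStepB, ← hl₁, ← hl₂, hruD, hrvD]
  have hstepA : pvUnionA fuel p u v = if ru ≠ rv then p₂.insert rv ru else p₂ := by
    rw [pvUnionA, ← hp₁, ← hru, ← hp₂, ← hrv]
  rw [hstepA, hstepB]
  by_cases hne : ru = rv
  · rw [if_neg (not_not_intro hne), if_neg (not_not_intro hne)]
    exact pvINV_mono (Nat.le_succ n) ⟨hk₂, hnd₂, hr₂⟩
  · rw [if_pos hne, if_pos hne]
    -- roots are self-parents in p₂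
    have humem : u ∈ l₂.keys := by
      by_contra hm
      rw [← PySem.Dict.get?_eq_none_iff_not_mem_keys] at hm
      rw [hm] at hgu₂; cases hgu₂
    have hvmem : v ∈ l₂.keys := by
      by_contra hm
      rw [← PySem.Dict.get?_eq_none_iff_not_mem_keys] at hm
      rw [hm] at hgv; cases hgv
    have hrootu : pvRootN n p₂ u = some ru := by rw [hr₂ u humem, hgu₂]
    have hrootv : pvRootN n p₂ v = some rv := by rw [hr₂ v hvmem, hgv]
    have hselfu : p₂.get? ru = some ru := pvRootN_root hrootu
    have hselfv : p₂.get? rv = some rv := pvRootN_root hrootv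
    refine ⟨?_, ?_, fun k hkm => ?_⟩
    · rw [pvRelabel_keys]
      rw [PySem.Dict.keys_insert_of_contains _ _ (by
        rw [PySem.Dict.contains_eq_isSome_get?, hselfv]; rfl)]
      exact hk₂
    · rw [pvRelabel_keys]; exact hnd₂
    · rw [pvRelabel_keys] at hkm
      obtain ⟨w, hw⟩ := pvGet?_of_mem_keys hkm
      have hrk : pvRootN n p₂ k = some w := by rw [hr₂ k hkm, hw]
      have := pvRootN_union hselfv hselfu hne n k w hrk
      rw [pvRelabel_get?, hw, this]
      rfl

-- the nested match loops preserve the invariant, spending one fuel unit per pair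
lemma pvInner_inv (fuel : Nat) (i1 i2 : Int) :
    ∀ (ms : List (Int × Int)) (p l : PySem.Dict (Int × Int) (Int × Int)) (n : Nat),
      pvINV n p l → 1 ≤ n → n + ms.length ≤ fuel →
      pvINV (n + ms.length)
        (ms.foldl (fun p m => pvUnionA fuel p (i1, m.1) (i2, m.2)) p)
        (ms.foldl (fun l m => pvStepB l (i1, m.1) (i2, m.2)) l) := by
  intro ms
  induction ms with
  | nil => intro p l n h _ _; simpa using h
  | cons m ms ih =>
    intro p l n h h1 hle
    simp only [List.foldl_cons, List.length_cons]
    have hle' : n + (m :: ms).length ≤ fuel := hle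
    simp only [List.length_cons] at hle'
    have hstep := pvStep_inv (fuel := fuel) (u := (i1, m.1)) (v := (i2, m.2)) h h1 (by omega)
    have := ih _ _ (n + 1) hstep (by omega) (by omega)
    simpa [Nat.add_assoc, Nat.add_comm 1 ms.length] using this

lemma pvFoldl_len (xs : List (Int × Int × List (Int × Int))) :
    ∀ c : Nat, xs.foldl (fun a x => a + x.2.2.length) c
      = c + xs.foldl (fun a x => a + x.2.2.length) 0 := by
  induction xs with
  | nil => intro c; simp
  | cons x xs ih =>
    intro c
    simp only [List.foldl_cons]
    rw [ih (c + x.2.2.length), ih (0 + x.2.2.length)]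
    omega

lemma pvOuter_inv (fuel : Nat) :
    ∀ (xs : List (Int × Int × List (Int × Int))) (p l : PySem.Dict (Int × Int) (Int × Int)) (n : Nat),
      pvINV n p l → 1 ≤ n → n + xs.foldl (fun a x => a + x.2.2.length) 0 ≤ fuel →
      pvINV (n + xs.foldl (fun a x => a + x.2.2.length) 0)
        (xs.foldl (fun p x => x.2.2.foldl (fun p m => pvUnionA fuel p (x.1, m.1) (x.2.1, m.2)) p) p)
        (xs.foldl (fun l x => x.2.2.foldl (fun l m => pvStepB l (x.1, m.1) (x.2.1, m.2)) l) l) := by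
  intro xs
  induction xs with
  | nil => intro p l n h _ _; simpa using h
  | cons x xs ih =>
    intro p l n h h1 hle
    simp only [List.foldl_cons] at hle ⊢
    rw [pvFoldl_len xs (0 + x.2.2.length)] at hle ⊢
    have hinner := pvInner_inv fuel x.1 x.2.1 x.2.2 p l n h h1 (by omega)
    have := ih _ _ (n + x.2.2.length) hinner (by omega) (by omega)
    -- reassociate the fuel counts
    have harith : n + x.2.2.length + xs.foldl (fun a x => a + x.2.2.length) 0
        = n + (0 + x.2.2.length + xs.foldl (fun a x => a + x.2.2.length) 0) := by omega
    rw [harith] at this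
    exact this

-- the two grouping folds agree when every label is the corresponding root
lemma pvGroup_eq (fuel : Nat) (label : PySem.Dict (Int × Int) (Int × Int)) :
    ∀ (ks : List (Int × Int)) (t : PySem.Dict (Int × Int) (List (Int × Int)))
      (q : PySem.Dict (Int × Int) (Int × Int)),
      (∀ k r, label.get? k = some r → pvRootN fuel q k = some r) →
      (∀ k ∈ ks, k ∈ label.keys) →
      (ks.foldl (fun tq node =>
          let rq := pvFindA fuel tq.2 node
          (tq.1.modify rq.1 [] (· ++ [node]), rq.2)) (t, q)).1
        = ks.foldl (fun t k => t.modify (label.getD k ((0 : Int), (0 : Int))) [] (· ++ [k])) t := by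
  intro ks
  induction ks with
  | nil => intro t q _ _; rfl
  | cons k ks ih =>
    intro t q hq hks
    simp only [List.foldl_cons]
    have hkmem : k ∈ label.keys := hks k (List.mem_cons_self ..)
    obtain ⟨r, hr⟩ := pvGet?_of_mem_keys hkmem
    have hroot : pvRootN fuel q k = some r := hq k r hr
    obtain ⟨f1, _, f3⟩ := pvFindA_spec fuel q k r hroot
    have hgetD : label.getD k ((0 : Int), (0 : Int)) = r := by
      rw [PySem.Dict.getD_eq_get?_getD, hr]; rfl
    rw [hgetD, ← f1]
    exact ih _ _ (fun k' r' h' => f3 fuel k' r' (hq k' r' h')) (fun k' h' => hks k' (List.mem_cons_of_mem _ h'))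

-- assembling: both programs return the same track list
theorem build_tracks_eq (pm : List (Int × Int × List (Int × Int))) (ni : Int) :
    build_tracks pm ni = build_tracks_alt pm ni := by
  rw [build_tracks, build_tracks_alt]
  set total := pm.foldl (fun a x => a + x.2.2.length) 0 with htotal
  set fuel := total + 1 with hfuel
  set parent := pm.foldl
    (fun p x => x.2.2.foldl (fun p m => pvUnionA fuel p (x.1, m.1) (x.2.1, m.2)) p)
    PySem.Dict.empty with hparent
  set label := pm.foldl
    (fun l x => x.2.2.foldl (fun l m => pvStepB l (x.1, m.1) (x.2.1, m.2)) l)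
    PySem.Dict.empty with hlabel
  have hinv0 : pvINV 1 PySem.Dict.empty (PySem.Dict.empty : PySem.Dict (Int × Int) (Int × Int)) := by
    refine ⟨rfl, ?_, ?_⟩
    · show (List.nil : List (Int × Int)).Nodup
      exact List.nodup_nil
    · intro k hk; cases hk
  have hinv : pvINV fuel parent label := by
    have h := pvOuter_inv fuel pm PySem.Dict.empty PySem.Dict.empty 1 hinv0 le_rfl (by omega)
    have hx : 1 + List.foldl (fun a x => a + x.2.2.length) 0 pm = fuel := by
      rw [hfuel, htotal]
      exact Nat.add_comm 1 _
    rw [hx] at h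
    rw [hparent, hlabel]
    exact h
  obtain ⟨hkeys, hnd, hroots⟩ := hinv
  have hq : ∀ k r, label.get? k = some r → pvRootN fuel parent k = some r := by
    intro k r h
    have hmem : k ∈ label.keys := by
      by_contra hm
      rw [← PySem.Dict.get?_eq_none_iff_not_mem_keys] at hm
      rw [hm] at h; cases h
    rw [hroots k hmem, h]
  have hA := pvGroup_eq fuel label parent.keys PySem.Dict.empty parent hq
    (fun k hk => hkeys ▸ hk)
  rw [hA]
  have hitems : label.items = label.keys.map (fun k => (k, label.getD k ((0:Int), (0:Int)))) :=
    PySem.Dict.items_eq_map_keys label hnd ((0:Int), (0:Int))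
  rw [hitems, List.foldl_map, hkeys]

-- ===== VERDICT (by name: the statement is the Claim_ definition above) =====
theorem build_tracks_spec : Claim_equal_build_tracks := by
  intro pairwise_matches num_images _
  unfold Spec_build_tracks
  exact build_tracks_eq pairwise_matches num_images
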